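-- pv_equiv track=rewrite | github.com/cgmb/guardonce | guardonce/once2guard.py | gather_pieces
-- ===== SOURCE A (Python) =====
-- def gather_pieces(fmtstr, placeholder):
--     """
--     Takes a format string where % marks replacements by placeholder, and %%
--     marks replacements by %. The returned object is a list of substrings and
--     placeholders.
--     """
--     pieces = []
--     substr = []
--     escape = False
--     for c in fmtstr:
--         if escape:
--             if c == '%':
--                 substr.append(c)
--             else:
--                 pieces.append(''.join(substr))
--                 substr = []
--                 pieces.append(placeholder)
--                 substr.append(c)
--             escape = False
--         else:
--             if c == '%':
--                 escape = True
--             else: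
--                 substr.append(c)
--     pieces.append(''.join(substr))
--     if escape:
--         pieces.append(placeholder)
--     return pieces
-- ===== SOURCE B (Python) =====
-- def gather_pieces(fmtstr, placeholder):
--     # Split once on '%'; each boundary between parts is one '%' character.
--     # Pair adjacent boundaries left-to-right: an empty part between two
--     # boundaries means '%%' (a literal '%'); an unpaired boundary is a
--     # placeholder.  A trailing unpaired '%' ends the list with the
--     # placeholder (no empty substring after it).
--     parts = fmtstr.split('%')
--     pieces = []
--     buf = parts[0]
--     i = 1
--     n = len(parts)
--     trailing_lone = False
--     while i < n:
--         if parts[i] == '' and i + 1 < n: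
--             buf += '%' + parts[i + 1]
--             i += 2
--         else:
--             pieces.append(buf)
--             pieces.append(placeholder)
--             buf = parts[i]
--             trailing_lone = (i == n - 1 and parts[i] == '')
--             i += 1
--     if not trailing_lone:
--         pieces.append(buf)
--     return pieces
-- ===== Notes on version B (the rewrite author's own statement) =====
-- stated objective: faster
-- what changed: Replaces the per-character escape-flag state machine with a single str.split('%') followed by a left-to-right pairing of the '%' boundaries (adjacent empty part = '%%' literal, unpaired boundary = placeholder).
import Mathlib
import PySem

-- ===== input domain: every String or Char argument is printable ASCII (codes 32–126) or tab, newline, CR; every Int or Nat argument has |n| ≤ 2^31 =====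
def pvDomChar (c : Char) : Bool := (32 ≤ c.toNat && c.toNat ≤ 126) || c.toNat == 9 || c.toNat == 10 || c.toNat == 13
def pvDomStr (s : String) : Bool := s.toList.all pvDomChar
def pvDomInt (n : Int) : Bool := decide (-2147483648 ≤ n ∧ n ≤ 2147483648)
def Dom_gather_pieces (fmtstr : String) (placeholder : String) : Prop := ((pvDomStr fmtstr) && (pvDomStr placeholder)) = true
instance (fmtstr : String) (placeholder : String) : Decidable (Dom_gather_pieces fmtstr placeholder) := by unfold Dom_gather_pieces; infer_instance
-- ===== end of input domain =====

-- B replaces A's per-character escape state machine by one str.split('%') pass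
-- plus a left-to-right pairing of the resulting boundaries (alternative decomposition).


-- ===== PORT A =====
-- one iteration of A's for-loop: state = (pieces, substr, escape)
def aStep (placeholder : String) (s : List String × List Char × Bool) (c : Char) :
    List String × List Char × Bool :=
  match s with
  | (pieces, substr, escape) =>
    if escape then
      if c = '%' then (pieces, substr ++ [c], false)
      else (pieces ++ [String.ofList substr, placeholder], [c], false)
    else
      if c = '%' then (pieces, substr, true)
      else (pieces, substr ++ [c], false)

-- A's code after the loop: pieces.append(''.join(substr)); if escape: pieces.append(placeholder)
-- (''.join of a list of single chars is exactly String.ofList of those chars)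
def aFinish (placeholder : String) (st : List String × List Char × Bool) : List String :=
  let pieces := st.1 ++ [String.ofList st.2.1]
  if st.2.2 then pieces ++ [placeholder] else pieces

def gather_pieces (fmtstr : String) (placeholder : String) : List String :=
  aFinish placeholder (fmtstr.toList.foldl (aStep placeholder) ([], [], false))

-- ===== PORT B =====
-- B's while loop over parts = fmtstr.split('%') with index i, as structural
-- recursion on the remaining suffix of parts (buf = current substring):
--  []                : loop over, no trailing lone '%': flush buf
--  [p]               : last boundary is lone: flush buf, placeholder; flush the
--                      new buf p afterwards unless p = '' (trailing lone '%')
--  [] :: q :: rest   : parts[i]=='' and i+1<n: the pair '%%', literal '%'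
--  (c::p) :: q :: rest : lone '%' mid-string: flush buf, placeholder, continue
def altGo (placeholder : String) (buf : List Char) : List (List Char) → List String
  | [] => [String.ofList buf]
  | [p] => if p = [] then [String.ofList buf, placeholder]
           else [String.ofList buf, placeholder, String.ofList p]
  | [] :: q :: rest => altGo placeholder (buf ++ '%' :: q) rest
  | (c :: p) :: q :: rest => String.ofList buf :: placeholder :: altGo placeholder (c :: p) (q :: rest)

-- fmtstr.split('%') for the one-char separator is exactly List.splitOn '%' on the chars
def gather_pieces_alt (fmtstr : String) (placeholder : String) : List String :=
  match fmtstr.toList.splitOn '%' with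
  | [] => []   -- unreachable: splitOn never returns []
  | p0 :: rest => altGo placeholder p0 rest

-- ===== PRECONDITION & SPEC =====
def Spec_gather_pieces (fmtstr : String) (placeholder : String) (out : List String) : Prop := out = gather_pieces_alt fmtstr placeholder
instance (fmtstr : String) (placeholder : String) (out : List String) : Decidable (Spec_gather_pieces fmtstr placeholder out) := by unfold Spec_gather_pieces; infer_instance

-- ===== CLAIM (what is proved, stated in full; the proofs are below) =====
def Claim_equal_gather_pieces : Prop := ∀ (fmtstr : String) (placeholder : String), Dom_gather_pieces fmtstr placeholder → Spec_gather_pieces fmtstr placeholder (gather_pieces fmtstr placeholder)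

-- ===== LEMMAS AND PROOFS =====

-- the characters A consumes for the part-suffix `rest` of the split
def pvGlue : List (List Char) → List Char
  | [] => []
  | p :: ps => '%' :: p ++ pvGlue ps

lemma foldA_nopct (ph : String) (p : List Char) (hp : '%' ∉ p) :
    ∀ pieces buf, p.foldl (aStep ph) (pieces, buf, false) = (pieces, buf ++ p, false) := by
  induction p with
  | nil => simp
  | cons c p ih =>
    intro pieces buf
    have hc : c ≠ '%' := fun h => hp (h ▸ List.mem_cons_self)
    have hp' : '%' ∉ p := fun h => hp (List.mem_cons_of_mem _ h)
    simp [List.foldl_cons, aStep, hc, ih hp']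

lemma splitOn_parts_nopct : ∀ cs : List Char, ∀ p ∈ cs.splitOn '%', '%' ∉ p := by
  intro cs
  induction cs with
  | nil => simp [List.splitOn, List.splitOnP_nil]
  | cons c cs ih =>
    intro p hp
    rw [List.splitOn, List.splitOnP_cons] at hp
    by_cases hc : c = '%'
    · simp [hc] at hp
      rcases hp with h | h
      · simp [h]
      · exact ih p (by rw [List.splitOn]; exact h)
    · simp [hc] at hp
      obtain ⟨h0, t, ht⟩ := List.exists_cons_of_ne_nil (List.splitOnP_ne_nil (· == '%') cs)
      rw [ht] at hp
      simp [List.modifyHead] at hp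
      rcases hp with h | h
      · subst h
        intro hm
        rcases List.mem_cons.mp hm with h | h
        · exact hc h.symm
        · exact ih h0 (by rw [List.splitOn, ht]; exact List.mem_cons_self) h
      · exact ih p (by rw [List.splitOn, ht]; exact List.mem_cons_of_mem _ h)

lemma intercalate_eq_glue : ∀ (ps : List (List Char)) (p : List Char),
    [('%' : Char)].intercalate (p :: ps) = p ++ pvGlue ps := by
  intro ps
  induction ps with
  | nil => intro p; simp [List.intercalate, pvGlue]
  | cons q ps ih =>
    intro p
    simp only [List.intercalate, List.intersperse_cons₂, List.flatten_cons] at *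
    simp [ih q, pvGlue]

lemma main_glue (ph : String) : ∀ (n : Nat) (rest : List (List Char)), rest.length ≤ n →
    (∀ p ∈ rest, '%' ∉ p) → ∀ pieces buf,
      aFinish ph ((pvGlue rest).foldl (aStep ph) (pieces, buf, false)) =
        pieces ++ altGo ph buf rest := by
  intro n
  induction n with
  | zero =>
    intro rest hn _ pieces buf
    rw [List.length_eq_zero_iff.mp (Nat.le_zero.mp hn)]
    simp [pvGlue, aFinish, altGo]
  | succ n ih =>
    intro rest hn hfree pieces buf
    match rest with
    | [] => simp [pvGlue, aFinish, altGo]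
    | [p] =>
      have hp : '%' ∉ p := hfree p List.mem_cons_self
      cases p with
      | nil => simp [pvGlue, aStep, aFinish, altGo]
      | cons c p' =>
        have hc : c ≠ '%' := fun h => hp (h ▸ List.mem_cons_self)
        have hp' : '%' ∉ p' := fun h => hp (List.mem_cons_of_mem _ h)
        simp [pvGlue, List.foldl_cons, aStep, hc, foldA_nopct ph p' hp', aFinish, altGo]
    | [] :: q :: rest' =>
      have hq : '%' ∉ q := hfree q (List.mem_cons_of_mem _ List.mem_cons_self)
      have hrest : ∀ p ∈ rest', '%' ∉ p := fun p hp =>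
        hfree p (List.mem_cons_of_mem _ (List.mem_cons_of_mem _ hp))
      have ihr := ih rest' (by simp at hn ⊢; omega) hrest pieces (buf ++ '%' :: q)
      simp only [pvGlue, List.nil_append, List.cons_append, List.foldl_cons]
      simp only [show aStep ph (pieces, buf, false) '%' = (pieces, buf, true) from by simp [aStep],
        show aStep ph (pieces, buf, true) '%' = (pieces, buf ++ ['%'], false) from by simp [aStep]]
      rw [List.foldl_append,
        show q.foldl (aStep ph) (pieces, buf ++ ['%'], false) = (pieces, buf ++ ['%'] ++ q, false)
          from foldA_nopct ph q hq pieces (buf ++ ['%'])]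
      rw [show altGo ph buf ([] :: q :: rest') = altGo ph (buf ++ '%' :: q) rest' from rfl]
      rw [← ihr]
      simp
    | (c :: p) :: q :: rest' =>
      have hcp : '%' ∉ c :: p := hfree _ List.mem_cons_self
      have hc : c ≠ '%' := fun h => hcp (h ▸ List.mem_cons_self)
      have hp : '%' ∉ p := fun h => hcp (List.mem_cons_of_mem _ h)
      have hrest : ∀ x ∈ q :: rest', '%' ∉ x := fun x hx => hfree x (List.mem_cons_of_mem _ hx)
      have ihr := ih (q :: rest') (by simp at hn ⊢; omega) hrest
        (pieces ++ [String.ofList buf, ph]) (c :: p)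
      simp only [pvGlue, List.cons_append, List.foldl_cons]
      simp only [show aStep ph (pieces, buf, false) '%' = (pieces, buf, true) from by simp [aStep],
        show aStep ph (pieces, buf, true) c = (pieces ++ [String.ofList buf, ph], [c], false)
          from by simp [aStep, hc]]
      rw [List.foldl_append,
        show p.foldl (aStep ph) (pieces ++ [String.ofList buf, ph], [c], false)
          = (pieces ++ [String.ofList buf, ph], [c] ++ p, false)
          from foldA_nopct ph p hp _ [c]]
      rw [show ([c] ++ p : List Char) = c :: p from rfl]
      rw [show ('%' :: (q ++ pvGlue rest') : List Char) = pvGlue (q :: rest') from rfl, ihr]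
      simp [altGo]

-- ===== VERDICT (by name: the statement is the Claim_ definition above) =====
theorem gather_pieces_spec : Claim_equal_gather_pieces := by
  intro fmtstr ph _
  unfold Spec_gather_pieces gather_pieces gather_pieces_alt
  obtain ⟨p0, rest, hsplit⟩ :=
    List.exists_cons_of_ne_nil (List.splitOnP_ne_nil (· == '%') fmtstr.toList)
  have hsplit' : fmtstr.toList.splitOn '%' = p0 :: rest := by rw [List.splitOn, hsplit]
  have hfree := splitOn_parts_nopct fmtstr.toList
  rw [hsplit'] at hfree
  have hcs : fmtstr.toList = p0 ++ pvGlue rest := by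
    have := List.intercalate_splitOn (xs := fmtstr.toList) '%'
    rw [hsplit', intercalate_eq_glue] at this
    exact this.symm
  rw [hsplit', hcs, List.foldl_append,
    foldA_nopct ph p0 (hfree p0 List.mem_cons_self) [] []]
  simpa using main_glue ph rest.length rest le_rfl (fun p hp => hfree p (List.mem_cons_of_mem _ hp)) [] p0
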